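-- pv_equiv track=rewrite | github.com/thuycom205/hn_woo | plugin/s_base/models/s_data_preview.py | get_product_variants_load_product_name
-- ===== SOURCE A (Python) =====
-- def get_product_variants_load_product_name(variants):
--     if variants:
--         list_variant = [{'product_variant_id': 'all', 'product_variant_title': 'All'}]
--         for variant in variants:
--             if 'node' in variant:
--                 if 'id' in variant['node']:
--                     product_variant_id = variant['node']['id'].split('/')[-1]
--                     if 'title' in variant['node']:
--                         if variant['node']['title'] == 'Default Title':
--                             return
--                         else:
--                             if product_variant_id:
--                                 list_variant.append({'product_variant_id': product_variant_id,
--                                                      'product_variant_title': variant['node']['title']})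
--         return list_variant
-- ===== SOURCE B (Python) =====
-- def _node_fields(variant):
--     # (variant_id_tail, title) when node/id/title are all present, else None
--     if 'node' in variant:
--         node = variant['node']
--         if 'id' in node and 'title' in node:
--             return node['id'].split('/')[-1], node['title']
--     return None
--
--
-- def get_product_variants_load_product_name(variants):
--     if not variants:
--         return None
--     fields = [f for f in map(_node_fields, variants) if f is not None]
--     if any(title == 'Default Title' for _, title in fields):
--         return None
--     return [{'product_variant_id': 'all', 'product_variant_title': 'All'}] + [
--         {'product_variant_id': vid, 'product_variant_title': title}
--         for vid, title in fields if vid]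
-- ===== Notes on version B (the rewrite author's own statement) =====
-- stated objective: simpler
-- what changed: Replaces A's single early-returning accumulation loop with a helper extracting (id,title) pairs once, an any() pre-scan for 'Default Title', and a list comprehension building the rows.
import Mathlib
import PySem

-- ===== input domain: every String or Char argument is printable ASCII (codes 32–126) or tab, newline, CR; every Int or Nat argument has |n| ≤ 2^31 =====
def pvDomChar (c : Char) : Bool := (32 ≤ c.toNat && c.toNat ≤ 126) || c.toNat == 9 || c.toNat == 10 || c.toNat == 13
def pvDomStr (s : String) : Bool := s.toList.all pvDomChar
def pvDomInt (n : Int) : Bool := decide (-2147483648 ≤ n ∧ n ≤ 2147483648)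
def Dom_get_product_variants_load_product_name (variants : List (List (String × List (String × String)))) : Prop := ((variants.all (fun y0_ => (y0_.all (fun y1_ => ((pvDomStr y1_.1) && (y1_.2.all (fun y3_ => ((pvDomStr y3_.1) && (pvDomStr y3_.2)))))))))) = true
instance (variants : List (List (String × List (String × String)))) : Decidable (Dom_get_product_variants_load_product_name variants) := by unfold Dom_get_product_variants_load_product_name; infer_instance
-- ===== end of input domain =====

-- B replaces A's single early-returning accumulation loop by a field-extraction helper,
-- an any-scan for 'Default Title', and a comprehension building the rows (objective: simpler).

-- ===== PORT A =====
-- dict lookup (first match) for the association-list dicts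
def pvLookup (d : List (String × String)) (k : String) : Option String := List.lookup k d

def pvLookupD (d : List (String × List (String × String))) (k : String) : Option (List (String × String)) := List.lookup k d

-- id.split('/')[-1]; split? with nonempty sep is always some of a nonempty list, so getD/getLastD are exact
def pvSplitLast (s : String) : String := (((PySem.Str.split? s "/").getD []).getLastD "")

-- the for-loop of A, carrying the accumulated list_variant
def aLoop (acc : List (List (String × String))) (vs : List (List (String × List (String × String)))) : Option (List (List (String × String))) :=
  match vs with
  | [] => some acc
  | v :: rest =>
    match pvLookupD v "node" with
    | none => aLoop acc rest
    | some node =>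
      match pvLookup node "id" with
      | none => aLoop acc rest
      | some idv =>
        let product_variant_id := pvSplitLast idv
        match pvLookup node "title" with
        | none => aLoop acc rest
        | some t =>
          if t = "Default Title" then none
          else if product_variant_id ≠ "" then
            aLoop (acc ++ [[("product_variant_id", product_variant_id), ("product_variant_title", t)]]) rest
          else aLoop acc rest

def get_product_variants_load_product_name (variants : List (List (String × List (String × String)))) : Option (List (List (String × String))) :=
  if variants ≠ [] then
    aLoop [[("product_variant_id", "all"), ("product_variant_title", "All")]] variants
  else none

-- ===== PORT B =====
-- (id_tail, title) when node/id/title are all present, else none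
def nodeFields (v : List (String × List (String × String))) : Option (String × String) :=
  match List.lookup "node" v with
  | some node =>
    match List.lookup "id" node, List.lookup "title" node with
    | some i, some t => some (pvSplitLast i, t)
    | _, _ => none
  | none => none

def get_product_variants_load_product_name_alt (variants : List (List (String × List (String × String)))) : Option (List (List (String × String))) :=
  if variants = [] then none
  else
    let fields := variants.filterMap nodeFields
    if fields.any (fun p => p.2 = "Default Title") then none
    else some ([("product_variant_id", "all"), ("product_variant_title", "All")] ::
      (fields.filter (fun p => p.1 ≠ "")).map
        (fun p => [("product_variant_id", p.1), ("product_variant_title", p.2)]))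

-- ===== PRECONDITION & SPEC =====
def Spec_get_product_variants_load_product_name (variants : List (List (String × List (String × String)))) (out : Option (List (List (String × String)))) : Prop := out = get_product_variants_load_product_name_alt variants
instance (variants : List (List (String × List (String × String)))) (out : Option (List (List (String × String)))) : Decidable (Spec_get_product_variants_load_product_name variants out) := by unfold Spec_get_product_variants_load_product_name; infer_instance

-- ===== CLAIM (what is proved, stated in full; the proofs are below) =====
def Claim_equal_get_product_variants_load_product_name : Prop := ∀ (variants : List (List (String × List (String × String)))), Dom_get_product_variants_load_product_name variants → Spec_get_product_variants_load_product_name variants (get_product_variants_load_product_name variants)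

-- ===== LEMMAS AND PROOFS =====
theorem aLoop_eq (vs : List (List (String × List (String × String)))) :
    ∀ (acc : List (List (String × String))),
    aLoop acc vs =
      if (vs.filterMap nodeFields).any (fun p => p.2 = "Default Title") then none
      else some (acc ++ ((vs.filterMap nodeFields).filter (fun p => p.1 ≠ "")).map
        (fun p => [("product_variant_id", p.1), ("product_variant_title", p.2)])) := by
  induction vs with
  | nil => intro acc; simp [aLoop]
  | cons v rest ih =>
    intro acc
    simp only [aLoop, nodeFields, List.filterMap_cons]
    cases hnode : List.lookup "node" v with
    | none => simp [nodeFields, pvLookupD, hnode, ih]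
    | some node =>
      cases hid : List.lookup "id" node with
      | none => simp [nodeFields, pvLookupD, pvLookup, hnode, hid, ih]
      | some idv =>
        cases ht : List.lookup "title" node with
        | none => simp [nodeFields, pvLookupD, pvLookup, hnode, hid, ht, ih]
        | some t =>
          simp only [pvLookupD, pvLookup, hnode, hid, ht]
          by_cases hdt : t = "Default Title"
          · simp [hdt]
          · by_cases hpv : pvSplitLast idv = ""
            · simp [nodeFields, hdt, hpv, ih]
            · simp [nodeFields, hdt, hpv, ih]

-- ===== VERDICT (by name: the statement is the Claim_ definition above) =====
theorem get_product_variants_load_product_name_spec : Claim_equal_get_product_variants_load_product_name := by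
  intro variants _
  show get_product_variants_load_product_name variants = get_product_variants_load_product_name_alt variants
  unfold get_product_variants_load_product_name get_product_variants_load_product_name_alt
  by_cases h : variants = []
  · simp [h]
  · simp only [h, ne_eq, not_false_eq_true, if_true, if_false, aLoop_eq]
    split <;> simp
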